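-- pv_equiv track=rewrite | github.com/samiemostafavi/EasyTemporalPointProcess | src/link_quality/predict.py | transform_list
-- ===== SOURCE A (Python) =====
-- def transform_list(input_list, max_period):
--     # Initialize an empty list to store the transformed values
--     transformed_list = []
--
--     # Keep track of period-based offset for each segment
--     offset = 0
--     previous_value = None
--
--     for i, value in enumerate(input_list):
--         # Check if there is a decrease or reset to a lower number (assumed new period start)
--         if previous_value is not None and value < previous_value:
--             offset += max_period  # Decrease offset by max_period
--
--         # Calculate and append the new value
--         transformed_value = value + offset
--         transformed_list.append(transformed_value)
--
--         # Update the previous value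
--         previous_value = value
--
--     return transformed_list
-- ===== SOURCE B (Python) =====
-- def transform_list(input_list, max_period):
--     # Prefix-table formulation: reset flags, running reset count, element-wise add.
--     if input_list:
--         flags = [0] + [1 if b < a else 0 for a, b in zip(input_list, input_list[1:])]
--     else:
--         flags = []
--     cum = []
--     total = 0
--     for f in flags:
--         total += f
--         cum.append(total)
--     return [v + c * max_period for v, c in zip(input_list, cum)]
-- ===== Notes on version B (the rewrite author's own statement) =====
-- stated objective: alternative
-- what changed: Replaces the single offset-mutating accumulator loop with an explicit reset-flag table, its running cumulative sum, and a final element-wise comprehension adding value + resets*max_period.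
import Mathlib
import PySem

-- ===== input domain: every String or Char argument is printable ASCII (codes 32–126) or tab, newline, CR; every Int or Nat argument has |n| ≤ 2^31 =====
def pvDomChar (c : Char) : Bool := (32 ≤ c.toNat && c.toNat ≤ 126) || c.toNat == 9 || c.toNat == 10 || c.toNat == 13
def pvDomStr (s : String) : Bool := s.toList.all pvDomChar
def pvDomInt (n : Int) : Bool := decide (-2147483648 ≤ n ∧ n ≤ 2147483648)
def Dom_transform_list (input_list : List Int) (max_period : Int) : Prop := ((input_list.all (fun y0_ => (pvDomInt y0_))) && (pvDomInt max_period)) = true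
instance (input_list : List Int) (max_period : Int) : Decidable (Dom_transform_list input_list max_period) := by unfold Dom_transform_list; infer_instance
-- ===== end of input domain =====

-- B replaces A's offset-mutating accumulator loop by an explicit reset-flag table,
-- its cumulative sum, and an element-wise pass (alternative decomposition, same cost).


-- ===== PORT A =====
-- state: (transformed_list, offset, previous_value)
def transform_list (input_list : List Int) (max_period : Int) : List Int :=
  (input_list.foldl
    (fun (s : List Int × Int × Option Int) value =>
      let offset : Int :=
        match s.2.2 with
        | some p => if value < p then s.2.1 + max_period else s.2.1
        | none => s.2.1
      (s.1 ++ [value + offset], offset, some value))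
    ([], 0, none)).1

-- ===== PORT B =====
def transform_list_alt (input_list : List Int) (max_period : Int) : List Int :=
  let flags : List Int :=
    match input_list with
    | [] => []
    | _ => 0 :: (input_list.zip input_list.tail).map (fun ab => if ab.2 < ab.1 then 1 else 0)
  let cum : List Int :=
    (flags.foldl (fun (s : Int × List Int) f => (s.1 + f, s.2 ++ [s.1 + f])) (0, [])).2
  (input_list.zip cum).map (fun vc => vc.1 + vc.2 * max_period)

-- ===== PRECONDITION & SPEC =====
def Spec_transform_list (input_list : List Int) (max_period : Int) (out : List Int) : Prop := out = transform_list_alt input_list max_period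
instance (input_list : List Int) (max_period : Int) (out : List Int) : Decidable (Spec_transform_list input_list max_period out) := by unfold Spec_transform_list; infer_instance

-- ===== CLAIM (what is proved, stated in full; the proofs are below) =====
def Claim_equal_transform_list : Prop := ∀ (input_list : List Int) (max_period : Int), Dom_transform_list input_list max_period → Spec_transform_list input_list max_period (transform_list input_list max_period)

-- ===== LEMMAS AND PROOFS =====

-- common recursive characterisation: unwrap starting after `prev` with current offset `off`
def pvGo (m prev off : Int) : List Int → List Int
  | [] => []
  | v :: t =>
      let off' := if v < prev then off + m else off
      (v + off') :: pvGo m v off' t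

theorem pvA_fold (max_period : Int) (xs : List Int) : ∀ (acc : List Int) (off prev : Int),
    (xs.foldl
      (fun (s : List Int × Int × Option Int) value =>
        let offset : Int :=
          match s.2.2 with
          | some p => if value < p then s.2.1 + max_period else s.2.1
          | none => s.2.1
        (s.1 ++ [value + offset], offset, some value))
      (acc, off, some prev) : List Int × Int × Option Int).1
      = acc ++ pvGo max_period prev off xs := by
  induction xs with
  | nil => intro acc off prev; simp [pvGo]
  | cons v t ih =>
      intro acc off prev
      simp only [List.foldl, pvGo]
      rw [ih]
      simp

-- prefix sums of flags starting from running total c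
def pvCum (c : Int) : List Int → List Int
  | [] => []
  | f :: t => (c + f) :: pvCum (c + f) t

theorem pvB_fold (fs : List Int) : ∀ (c : Int) (acc : List Int),
    (fs.foldl (fun (s : Int × List Int) f => (s.1 + f, s.2 ++ [s.1 + f])) (c, acc)).2
      = acc ++ pvCum c fs := by
  induction fs with
  | nil => intro c acc; simp [pvCum]
  | cons f t ih =>
      intro c acc
      simp only [List.foldl, pvCum]
      rw [ih]
      simp

-- flags over consecutive pairs, head `prev`
def pvZf (prev : Int) : List Int → List Int
  | [] => []
  | u :: t => (if u < prev then 1 else 0) :: pvZf u t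

theorem pvZip_flags (v : Int) (t : List Int) :
    ((v :: t).zip t).map (fun ab : Int × Int => if ab.2 < ab.1 then (1 : Int) else 0) = pvZf v t := by
  induction t generalizing v with
  | nil => simp [pvZf]
  | cons u t ih => simp only [pvZf, List.zip_cons_cons, List.map_cons, ih]

theorem pvMain (m : Int) (t : List Int) : ∀ (prev c : Int),
    (t.zip (pvCum c (pvZf prev t))).map (fun vc : Int × Int => vc.1 + vc.2 * m)
      = pvGo m prev (c * m) t := by
  induction t with
  | nil => intro prev c; simp [pvZf, pvCum, pvGo]
  | cons u t ih =>
      intro prev c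
      simp only [pvZf, pvCum, pvGo, List.zip_cons_cons, List.map_cons]
      split_ifs with h
      · rw [ih]
        have e2 : (c + 1) * m = c * m + m := by ring
        rw [e2]
      · simp only [add_zero]
        rw [ih]

theorem transform_eq (xs : List Int) (m : Int) :
    transform_list xs m = transform_list_alt xs m := by
  cases xs with
  | nil => rfl
  | cons v t =>
      unfold transform_list transform_list_alt
      simp only [List.foldl]
      rw [pvA_fold]
      simp only [List.tail_cons]
      rw [pvZip_flags]
      rw [pvB_fold]
      simp only [List.nil_append, List.cons_append, add_zero]
      simp only [List.zip_cons_cons, List.map_cons]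
      rw [pvMain]
      simp only [zero_mul, add_zero]

-- ===== VERDICT (by name: the statement is the Claim_ definition above) =====
theorem transform_list_spec : Claim_equal_transform_list := by
  intro xs m _
  unfold Spec_transform_list
  exact transform_eq xs m
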